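-- pv_equiv track=rewrite | github.com/SandyHoffmann/ListasPythonAlgoritmo | Lista 9/SH-PCRG-AER-Alg-09-Ex-11.py | elimina_simbolos
-- ===== SOURCE A (Python) =====
-- def elimina_simbolos(string):
--     simbolos_eliminar = ["?",",",".","!"]
--     string2 = string
--     for s in simbolos_eliminar:
--         string = string.replace(s,"")
--     if string2 != string:
--         return False
--     return True
-- ===== SOURCE B (Python) =====
-- def elimina_simbolos(string):
--     return not any(c in {'?', ',', '.', '!'} for c in string)
-- ===== Notes on version B (the rewrite author's own statement) =====
-- stated objective: simpler
-- what changed: Replaced the four replace-and-compare string rebuilds with a single short-circuiting character scan testing membership in the fixed symbol set.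
import Mathlib
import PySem

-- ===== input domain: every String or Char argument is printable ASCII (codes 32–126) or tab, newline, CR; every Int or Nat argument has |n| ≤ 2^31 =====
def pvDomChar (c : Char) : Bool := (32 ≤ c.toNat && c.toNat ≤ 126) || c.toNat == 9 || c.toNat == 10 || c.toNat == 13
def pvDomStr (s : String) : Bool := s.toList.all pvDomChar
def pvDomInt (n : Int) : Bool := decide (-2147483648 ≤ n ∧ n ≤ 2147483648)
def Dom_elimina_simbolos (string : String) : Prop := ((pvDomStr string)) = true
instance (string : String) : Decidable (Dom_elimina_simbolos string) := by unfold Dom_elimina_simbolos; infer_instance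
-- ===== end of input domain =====

-- B replaces A's four replace-and-compare string rebuilds with one character scan; return value only.

-- ===== PORT A =====
def elimina_simbolos (string : String) : Bool :=
  let simbolos_eliminar : List String := ["?", ",", ".", "!"]
  let string2 := string
  let string' := simbolos_eliminar.foldl (fun st s => PySem.Str.replace st s "") string
  if string2 ≠ string' then false else true

-- ===== PORT B =====
def elimina_simbolos_alt (string : String) : Bool :=
  !(string.toList.any (fun c => c == '?' || c == ',' || c == '.' || c == '!'))

-- ===== PRECONDITION & SPEC =====
def Spec_elimina_simbolos (string : String) (out : Bool) : Prop := out = elimina_simbolos_alt string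
instance (string : String) (out : Bool) : Decidable (Spec_elimina_simbolos string out) := by unfold Spec_elimina_simbolos; infer_instance

-- ===== CLAIM (what is proved, stated in full; the proofs are below) =====
def Claim_equal_elimina_simbolos : Prop := ∀ (string : String), Dom_elimina_simbolos string → Spec_elimina_simbolos string (elimina_simbolos string)

-- ===== LEMMAS AND PROOFS =====

-- replace.go with a one-char pattern and empty replacement is a filter
lemma replace_go_filter (c : Char) (fuel : Nat) (l acc : List Char) (h : l.length ≤ fuel) :
    PySem.Chars.replace.go [c] [] fuel l acc = acc.reverse ++ l.filter (fun d => d ≠ c) := by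
  induction fuel generalizing l acc with
  | zero =>
    have : l = [] := List.length_eq_zero_iff.mp (Nat.le_zero.mp h)
    subst this
    simp [PySem.Chars.replace.go]
  | succ n ih =>
    cases l with
    | nil => simp [PySem.Chars.replace.go]
    | cons d t =>
      simp only [PySem.Chars.replace.go]
      by_cases hdc : c = d
      · subst hdc
        simp only [List.isPrefixOf, beq_self_eq_true, Bool.true_and, if_pos]
        rw [ih _ _ (by simpa using Nat.le_of_succ_le_succ h)]
        simp
      · have : List.isPrefixOf [c] (d :: t) = false := by
          simp [List.isPrefixOf, hdc]
        rw [this]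
        simp only [Bool.false_eq_true, if_false]
        rw [ih _ _ (by simpa using Nat.le_of_succ_le_succ h)]
        simp [Ne.symm hdc]

lemma replace_one_char (s : List Char) (c : Char) :
    PySem.Chars.replace s [c] [] = s.filter (fun d => d ≠ c) := by
  rw [PySem.Chars.replace]
  simp only [List.isEmpty_cons]
  exact replace_go_filter c s.length s [] le_rfl

-- ===== VERDICT (by name: the statement is the Claim_ definition above) =====
theorem elimina_simbolos_spec : Claim_equal_elimina_simbolos := by
  intro string _
  show elimina_simbolos string = elimina_simbolos_alt string
  unfold elimina_simbolos elimina_simbolos_alt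
  simp only [List.foldl_cons, List.foldl_nil, ne_eq]
  have hrep : ∀ (st sym : String) (c : Char), sym.toList = [c] →
      (PySem.Str.replace st sym "").toList = st.toList.filter (fun d => d ≠ c) := by
    intro st sym c hsym
    rw [PySem.Str.toList_replace, hsym]
    simpa using replace_one_char st.toList c
  have key : (PySem.Str.replace (PySem.Str.replace (PySem.Str.replace
      (PySem.Str.replace string "?" "") "," "") "." "") "!" "").toList
      = string.toList.filter
          (fun d => d ≠ '?' && d ≠ ',' && d ≠ '.' && d ≠ '!') := by
    rw [hrep _ _ '!' rfl, hrep _ _ '.' rfl, hrep _ _ ',' rfl, hrep _ _ '?' rfl]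
    simp [List.filter_filter, Bool.and_comm, Bool.and_left_comm]
  by_cases heq : string = PySem.Str.replace (PySem.Str.replace (PySem.Str.replace
      (PySem.Str.replace string "?" "") "," "") "." "") "!" ""
  · rw [if_neg (not_not.mpr heq)]
    have hl : string.toList = string.toList.filter
        (fun d => d ≠ '?' && d ≠ ',' && d ≠ '.' && d ≠ '!') := by
      conv_lhs => rw [heq]
      exact key
    have := List.filter_eq_self.mp hl.symm
    symm
    simp only [Bool.not_eq_true', List.any_eq_false]
    intro c hc
    have h2 := this c hc
    simp only [Bool.and_eq_true, ne_eq, decide_eq_true_eq] at h2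
    simp [h2.1.1.1, h2.1.1.2, h2.1.2, h2.2]
  · rw [if_pos heq]
    symm
    simp only [Bool.not_eq_false', List.any_eq_true]
    by_contra hno
    rw [not_exists] at hno
    apply heq
    have hl : string.toList.filter
        (fun d => d ≠ '?' && d ≠ ',' && d ≠ '.' && d ≠ '!') = string.toList := by
      apply List.filter_eq_self.mpr
      intro c hc
      have h2 : ¬ ((c == '?' || c == ',' || c == '.' || c == '!') = true) :=
        fun hb => hno c ⟨hc, hb⟩
      simp only [Bool.or_eq_true, beq_iff_eq, not_or] at h2
      simp [h2.1.1.1, h2.1.1.2, h2.1.2, h2.2]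
    have : (PySem.Str.replace (PySem.Str.replace (PySem.Str.replace
        (PySem.Str.replace string "?" "") "," "") "." "") "!" "").toList = string.toList := by
      rw [key, hl]
    exact (String.toList_inj.mp this).symm
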